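-- pv_equiv track=rewrite | github.com/Aasthaengg/IBMdataset | Python_codes/p03050/s845088196.py | solve
-- ===== SOURCE A (Python) =====
-- def solve(n):
--     if n == 1:
--         return 0
--     conds = set()
--     conds.add(n-1)
--     for i in range(2, int(n ** 0.5) + 1):
--         if n % i == 0:
--             conds.add(i-1)
--             conds.add(n // i - 1)
--     total = 0
--     for m in list(conds):
--         if n // m == n % m:
--             total += m
--     return total
-- ===== SOURCE B (Python) =====
-- def solve(n):
--     total = 0
--     r = 1
--     while r * (r + 1) < n:
--         if n % r == 0:
--             total += n // r - 1
--         r += 1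
--     return total
-- ===== Notes on version B (the rewrite author's own statement) =====
-- stated objective: alternative
-- what changed: B drops A's float-sqrt divisor enumeration, candidate set and re-filtering by n//m==n%m, and instead sums n//r-1 directly over the small complementary divisors r with r*(r+1) < n in one while loop.
-- intended difference: For n = 0 A's candidate set contains the leftover m = -1, for which 0//-1 == 0%-1 holds, so A returns -1; B returns 0, the intended empty sum since no positive m qualifies. — e.g. on solve(0): A returns -1, B returns 0
-- outside the precondition, e.g. on solve(-1): A raises TypeError, B returns 0
import Mathlib
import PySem

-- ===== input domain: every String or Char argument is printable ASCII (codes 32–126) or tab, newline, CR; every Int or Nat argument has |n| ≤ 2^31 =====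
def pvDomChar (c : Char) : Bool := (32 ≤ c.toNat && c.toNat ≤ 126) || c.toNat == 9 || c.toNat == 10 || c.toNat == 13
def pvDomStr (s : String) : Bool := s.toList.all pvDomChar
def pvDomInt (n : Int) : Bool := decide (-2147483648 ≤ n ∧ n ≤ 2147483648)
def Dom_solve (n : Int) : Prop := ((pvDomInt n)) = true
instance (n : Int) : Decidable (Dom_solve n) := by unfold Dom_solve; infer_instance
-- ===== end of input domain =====

-- B replaces A's float-sqrt divisor-set enumeration plus re-filtering by a direct one-loop sum of n//r - 1 over complementary divisors r with r*(r+1) < n: an alternative algorithm, same results for n >= 1.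


-- ===== PORT A =====
-- int(n ** 0.5) is ported as Nat.sqrt n.toNat: exact for the admitted 0 ≤ n ≤ 2^31
-- (doubles represent these values and their square roots with enough precision).
def solve (n : Int) : Int :=
  if n = 1 then 0
  else
    let conds : PySem.Set Int := PySem.Set.add PySem.Set.empty (n - 1)
    let conds : PySem.Set Int :=
      (PySem.List.pyRange 2 (((Nat.sqrt n.toNat : Int)) + 1) 1).foldl
        (fun c i =>
          if PySem.Int.mod n i = 0 then
            PySem.Set.add (PySem.Set.add c (i - 1)) (PySem.Int.floordiv n i - 1)
          else c)
        conds
    -- summing over list(conds): the result is order-independent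
    conds.foldl
      (fun total m =>
        if PySem.Int.floordiv n m = PySem.Int.mod n m then total + m else total) 0

-- ===== PORT B =====
def solveAltLoop (n total r : Int) : Int :=
  if h : r * (r + 1) < n then
    solveAltLoop n
      (if PySem.Int.mod n r = 0 then total + (PySem.Int.floordiv n r - 1) else total)
      (r + 1)
  else total
termination_by (n - r).toNat
decreasing_by
  have h1 : 0 ≤ r * r := mul_self_nonneg r
  have h2 : r * (r + 1) = r * r + r := by ring
  rw [h2] at h
  omega

def solve_alt (n : Int) : Int := solveAltLoop n 0 1

-- ===== PRECONDITION & SPEC =====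
-- Pre_ excludes n < 0, where A raises TypeError (n ** 0.5 is a complex number).
def Pre_solve (n : Int) : Prop := 0 ≤ n
instance (n : Int) : Decidable (Pre_solve n) := by unfold Pre_solve; infer_instance
def pvWitness_solve : Int := 12

-- For n = 0 A's candidate set contains the leftover m = -1, for which 0//-1 == 0%-1
-- holds, so A returns -1; B returns 0, the intended empty sum (no positive m qualifies).
def D_solve (n : Int) : Prop := n = 0
instance (n : Int) : Decidable (D_solve n) := by unfold D_solve; infer_instance

def Spec_solve (n : Int) (out : Int) : Prop := ¬ D_solve n → out = solve_alt n
instance (n : Int) (out : Int) : Decidable (Spec_solve n out) := by unfold Spec_solve; infer_instance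

def pvDiffWitness_solve : Int := 0
def pvDiffWitnessOut_solve : Int × Int := (-1, 0)

-- ===== CLAIM (what is proved, stated in full; the proofs are below) =====
def Claim_unchanged_solve : Prop := ∀ (n : Int), Dom_solve n → Pre_solve n → Spec_solve n (solve n)
def Claim_changed_solve : Prop := Dom_solve (pvDiffWitness_solve) ∧ Pre_solve (pvDiffWitness_solve) ∧ D_solve (pvDiffWitness_solve) ∧ solve (pvDiffWitness_solve) = pvDiffWitnessOut_solve.1 ∧ solve_alt (pvDiffWitness_solve) = pvDiffWitnessOut_solve.2 ∧ pvDiffWitnessOut_solve.1 ≠ pvDiffWitnessOut_solve.2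
def Claim_exact_solve : Prop := ∀ (n : Int), Dom_solve n → Pre_solve n → D_solve n → solve n ≠ solve_alt n

-- ===== LEMMAS AND PROOFS =====

theorem pv_foldl_sum (n : Int) (l : List Int) (a : Int) :
    l.foldl (fun total m =>
      if PySem.Int.floordiv n m = PySem.Int.mod n m then total + m else total) a
    = a + (l.filter (fun m =>
        decide (PySem.Int.floordiv n m = PySem.Int.mod n m))).sum := by
  induction l generalizing a with
  | nil => simp
  | cons x t ih =>
    simp only [List.foldl_cons, List.filter_cons, decide_eq_true_eq]
    split_ifs with h
    · rw [ih, List.sum_cons]; ring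
    · exact ih a

-- membership in A's candidate set after the divisor loop
theorem pv_mem_conds (n : Int) (l : List Int) (c : PySem.Set Int) (y : Int) :
    y ∈ l.foldl (fun c i =>
        if PySem.Int.mod n i = 0 then
          PySem.Set.add (PySem.Set.add c (i - 1)) (PySem.Int.floordiv n i - 1)
        else c) c
    ↔ y ∈ c ∨ ∃ i ∈ l, PySem.Int.mod n i = 0 ∧ (y = i - 1 ∨ y = PySem.Int.floordiv n i - 1) := by
  induction l generalizing c with
  | nil => simp
  | cons x t ih =>
    simp only [List.foldl_cons]
    split_ifs with h
    · rw [ih]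
      simp only [PySem.Set.mem_add, List.mem_cons]
      constructor
      · rintro (((hc | h1) | h2) | ⟨i, hi, hmod, hy⟩)
        · exact Or.inl hc
        · exact Or.inr ⟨x, Or.inl rfl, h, Or.inl h1⟩
        · exact Or.inr ⟨x, Or.inl rfl, h, Or.inr h2⟩
        · exact Or.inr ⟨i, Or.inr hi, hmod, hy⟩
      · rintro (hc | ⟨i, (rfl | hi), hmod, hy⟩)
        · exact Or.inl (Or.inl (Or.inl hc))
        · rcases hy with h1 | h2
          · exact Or.inl (Or.inl (Or.inr h1))
          · exact Or.inl (Or.inr h2)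
        · exact Or.inr ⟨i, hi, hmod, hy⟩
    · rw [ih]
      simp only [List.mem_cons]
      constructor
      · rintro (hc | ⟨i, hi, hmod, hy⟩)
        · exact Or.inl hc
        · exact Or.inr ⟨i, Or.inr hi, hmod, hy⟩
      · rintro (hc | ⟨i, (rfl | hi), hmod, hy⟩)
        · exact Or.inl hc
        · exact absurd hmod h
        · exact Or.inr ⟨i, hi, hmod, hy⟩

theorem pv_nodup_conds (n : Int) (l : List Int) (c : PySem.Set Int) (hc : c.Nodup) :
    (l.foldl (fun c i =>
        if PySem.Int.mod n i = 0 then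
          PySem.Set.add (PySem.Set.add c (i - 1)) (PySem.Int.floordiv n i - 1)
        else c) c).Nodup := by
  induction l generalizing c with
  | nil => exact hc
  | cons x t ih =>
    simp only [List.foldl_cons]
    split_ifs with h
    · exact ih _ (PySem.Set.nodup_add _ _ (PySem.Set.nodup_add _ _ hc))
    · exact ih _ hc

-- ← direction: every m in [1, n) satisfying the condition is in A's candidate set
theorem pv_cond_mem (n m : Int) (hn : 2 ≤ n) (h1 : 1 ≤ m) (_h2 : m < n)
    (hp : PySem.Int.floordiv n m = PySem.Int.mod n m) :
    m = n - 1 ∨ ∃ i, (2 ≤ i ∧ i < (Nat.sqrt n.toNat : Int) + 1) ∧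
      PySem.Int.mod n i = 0 ∧ (m = i - 1 ∨ m = PySem.Int.floordiv n i - 1) := by
  have hm0 : 0 < m := h1
  rw [PySem.Int.floordiv_eq_ediv_of_pos hm0, PySem.Int.mod_eq_emod_of_pos hm0] at hp
  set r := n % m with hr
  have hrlt : r < m := Int.emod_lt_of_pos n hm0
  have hr0 : 0 ≤ r := Int.emod_nonneg n (by omega)
  have hsplit : m * (n / m) + n % m = n := Int.mul_ediv_add_emod n m
  have hn_eq : n = r * (m + 1) := by rw [← hsplit, hp, ← hr]; ring
  have hr1 : 1 ≤ r := by
    by_contra h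
    have hr' : r = 0 := by omega
    rw [hr', zero_mul] at hn_eq; omega
  rcases eq_or_lt_of_le hr1 with h1r | h2r
  · -- r = 1 : n = m + 1, m = n - 1
    rw [← h1r, one_mul] at hn_eq
    left; omega
  · -- r ≥ 2 : i = r works
    right
    refine ⟨r, ⟨by omega, ?_⟩, ?_, Or.inr ?_⟩
    · -- r ≤ sqrt n since r * r < n
      have hrr : r * r < n := by
        calc r * r < r * (m + 1) := by
              apply mul_lt_mul_of_pos_left (by omega) (by omega)
          _ = n := hn_eq.symm
      have key : (r.toNat : Int) * (r.toNat : Int) ≤ (n.toNat : Int) := by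
        rw [Int.toNat_of_nonneg hr0, Int.toNat_of_nonneg (by omega : (0:Int) ≤ n)]
        omega
      have h2s : r.toNat ≤ Nat.sqrt n.toNat := Nat.le_sqrt.mpr (by exact_mod_cast key)
      omega
    · rw [PySem.Int.mod_eq_zero_iff_dvd]
      exact ⟨m + 1, hn_eq⟩
    · rw [PySem.Int.floordiv_eq_ediv_of_pos (by omega : (0:Int) < r), hn_eq,
        Int.mul_ediv_cancel_left _ (by omega : r ≠ 0)]
      ring

-- → direction: every candidate is in [1, n)
theorem pv_mem_bounds (n m : Int) (hn : 2 ≤ n)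
    (h : m = n - 1 ∨ ∃ i, (2 ≤ i ∧ i < (Nat.sqrt n.toNat : Int) + 1) ∧
      PySem.Int.mod n i = 0 ∧ (m = i - 1 ∨ m = PySem.Int.floordiv n i - 1)) :
    1 ≤ m ∧ m < n := by
  rcases h with rfl | ⟨i, ⟨hi2, hisq⟩, hmod, hmi⟩
  · omega
  · have hii : i * i ≤ n := by
      have h1 : i.toNat ≤ Nat.sqrt n.toNat := by omega
      have h2 : i.toNat * i.toNat ≤ n.toNat := Nat.le_sqrt.mp h1
      have h3 : ((i.toNat * i.toNat : Nat) : Int) ≤ ((n.toNat : Nat) : Int) := by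
        exact_mod_cast h2
      push_cast at h3
      rwa [Int.toNat_of_nonneg (by omega : (0:Int) ≤ i),
        Int.toNat_of_nonneg (by omega : (0:Int) ≤ n)] at h3
    have hdvd : i ∣ n := (PySem.Int.mod_eq_zero_iff_dvd n i).mp hmod
    rcases hmi with rfl | rfl
    · exact ⟨by omega, by nlinarith⟩
    · rw [PySem.Int.floordiv_eq_ediv_of_pos (by omega : (0:Int) < i)]
      obtain ⟨k, hk⟩ := hdvd
      rw [hk, Int.mul_ediv_cancel_left _ (by omega : i ≠ 0)]
      have hk2 : 2 ≤ k := by nlinarith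
      exact ⟨by omega, by nlinarith⟩

-- A equals the brute-force sum over m in [1, n) of the m satisfying the condition
theorem pv_A_eq (n : Int) (hn : 2 ≤ n) :
    solve n = ((PySem.List.pyRange 1 n 1).filter (fun m =>
      decide (PySem.Int.floordiv n m = PySem.Int.mod n m))).sum := by
  unfold solve
  rw [if_neg (by omega : ¬ n = 1)]
  rw [pv_foldl_sum]
  simp only [zero_add]
  apply List.Perm.sum_eq
  apply (List.perm_ext_iff_of_nodup _ _).mpr
  · intro m
    simp only [List.mem_filter, pv_mem_conds, PySem.Set.mem_add,
      PySem.List.mem_pyRange_one, decide_eq_true_eq]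
    constructor
    · rintro ⟨hmem, hcond⟩
      refine ⟨?_, hcond⟩
      rcases hmem with (hf | hc) | ⟨i, hi, hmod, hy⟩
      · exact absurd hf (List.not_mem_nil)
      · exact pv_mem_bounds n m hn (Or.inl hc)
      · exact pv_mem_bounds n m hn (Or.inr ⟨i, hi, hmod, hy⟩)
    · rintro ⟨⟨hlo, hhi⟩, hcond⟩
      refine ⟨?_, hcond⟩
      rcases pv_cond_mem n m hn hlo hhi hcond with hc | ⟨i, hi, hmod, hy⟩
      · exact Or.inl (Or.inr hc)
      · exact Or.inr ⟨i, hi, hmod, hy⟩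
  · exact List.Nodup.filter _
      (pv_nodup_conds n _ _ (PySem.Set.nodup_add _ _ List.nodup_nil))
  · exact List.Nodup.filter _ (PySem.List.nodup_pyRange_one 1 n)

-- B's while loop equals the sum of n//r - 1 over the whole range [r, n) filtered
theorem pv_loop (n r t : Int) (hr : 1 ≤ r) :
    solveAltLoop n t r = t + (((PySem.List.pyRange r n 1).filter (fun x =>
        decide (x * (x + 1) < n ∧ PySem.Int.mod n x = 0))).map
      (fun x => PySem.Int.floordiv n x - 1)).sum := by
  rw [solveAltLoop]
  by_cases h : r * (r + 1) < n
  · rw [dif_pos h]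
    have hrn : r < n := by nlinarith
    rw [pv_loop n (r + 1) _ (by omega), PySem.List.pyRange_one_cons hrn,
      List.filter_cons]
    by_cases hm : PySem.Int.mod n r = 0
    · rw [if_pos hm, if_pos (by simp [h, hm]), List.map_cons, List.sum_cons]
      ring
    · rw [if_neg hm, if_neg (by simp [hm])]
  · rw [dif_neg h]
    have hnil : (PySem.List.pyRange r n 1).filter (fun x =>
        decide (x * (x + 1) < n ∧ PySem.Int.mod n x = 0)) = [] := by
      apply List.filter_eq_nil_iff.mpr
      intro x hx
      rw [PySem.List.mem_pyRange_one] at hx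
      simp only [decide_eq_true_eq, not_and]
      intro hlt
      exfalso
      nlinarith [hx.1, hx.2,
        mul_nonneg (by omega : (0:Int) ≤ x - r) (by omega : (0:Int) ≤ x + r + 1)]
    rw [hnil]
    simp
termination_by (n - r).toNat
decreasing_by
  have h1 : 0 ≤ r * r := mul_self_nonneg r
  have h2 : r * (r + 1) = r * r + r := by ring
  rw [h2] at h
  omega

-- the valid m are exactly n//r - 1 for the divisors r with r*(r+1) < n
theorem pv_valid_iff (n y : Int) (hn : 2 ≤ n) :
    ((1 ≤ y ∧ y < n) ∧ PySem.Int.floordiv n y = PySem.Int.mod n y) ↔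
    ∃ r, ((1 ≤ r ∧ r < n) ∧ r * (r + 1) < n ∧ PySem.Int.mod n r = 0) ∧
      y = PySem.Int.floordiv n r - 1 := by
  constructor
  · rintro ⟨⟨hlo, hhi⟩, hp⟩
    have hy0 : 0 < y := hlo
    rw [PySem.Int.floordiv_eq_ediv_of_pos hy0, PySem.Int.mod_eq_emod_of_pos hy0] at hp
    set r := n % y with hr
    have hrlt : r < y := Int.emod_lt_of_pos n hy0
    have hr0 : 0 ≤ r := Int.emod_nonneg n (by omega)
    have hsplit : y * (n / y) + n % y = n := Int.mul_ediv_add_emod n y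
    have hn_eq : n = r * (y + 1) := by rw [← hsplit, hp, ← hr]; ring
    have hr1 : 1 ≤ r := by
      by_contra hcon
      have hr' : r = 0 := by omega
      rw [hr', zero_mul] at hn_eq; omega
    refine ⟨r, ⟨⟨hr1, by omega⟩, by nlinarith, ?_⟩, ?_⟩
    · rw [PySem.Int.mod_eq_zero_iff_dvd]; exact ⟨y + 1, hn_eq⟩
    · rw [PySem.Int.floordiv_eq_ediv_of_pos (by omega : (0:Int) < r), hn_eq,
        Int.mul_ediv_cancel_left _ (by omega : r ≠ 0)]
      ring
  · rintro ⟨r, ⟨⟨hr1, _⟩, hlt, hmod⟩, rfl⟩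
    have hdvd : r ∣ n := (PySem.Int.mod_eq_zero_iff_dvd n r).mp hmod
    obtain ⟨k, hk⟩ := hdvd
    have hfd : PySem.Int.floordiv n r = k := by
      rw [PySem.Int.floordiv_eq_ediv_of_pos (by omega : (0:Int) < r), hk,
        Int.mul_ediv_cancel_left _ (by omega : r ≠ 0)]
    rw [hfd]
    have hlt' : r * (r + 1) < r * k := by rw [← hk]; exact hlt
    have hrk : r + 1 < k := (Int.mul_lt_mul_left (by omega : (0:Int) < r)).mp hlt'
    have hy0 : 0 < k - 1 := by omega
    refine ⟨⟨by omega, by nlinarith⟩, ?_⟩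
    rw [PySem.Int.floordiv_eq_ediv_of_pos hy0, PySem.Int.mod_eq_emod_of_pos hy0]
    have hne : n = r + r * (k - 1) := by rw [hk]; ring
    rw [hne, Int.add_mul_ediv_right _ _ (by omega : k - 1 ≠ 0),
      Int.add_mul_emod_self_right _ _ _]
    rw [Int.ediv_eq_zero_of_lt (by omega) (by omega),
      Int.emod_eq_of_lt (by omega) (by omega)]
    omega

theorem pv_main (n : Int) (hn : 2 ≤ n) : solve n = solve_alt n := by
  rw [pv_A_eq n hn]
  unfold solve_alt
  rw [pv_loop n 1 0 (by omega), zero_add]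
  apply List.Perm.sum_eq
  apply (List.perm_ext_iff_of_nodup _ _).mpr
  · intro m
    simp only [List.mem_filter, List.mem_map, PySem.List.mem_pyRange_one,
      decide_eq_true_eq]
    constructor
    · rintro ⟨hb, hcond⟩
      obtain ⟨r, hr, hy⟩ := (pv_valid_iff n m hn).mp ⟨hb, hcond⟩
      exact ⟨r, ⟨hr.1, ⟨hr.2.1, hr.2.2⟩⟩, hy.symm⟩
    · rintro ⟨r, ⟨hb, hq⟩, rfl⟩
      obtain ⟨hbm, hcond⟩ := (pv_valid_iff n _ hn).mpr ⟨r, ⟨hb, hq.1, hq.2⟩, rfl⟩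
      exact ⟨hbm, hcond⟩
  · exact List.Nodup.filter _ (PySem.List.nodup_pyRange_one 1 n)
  · apply List.Nodup.map_on
    · intro r1 h1 r2 h2 hf
      simp only [List.mem_filter, PySem.List.mem_pyRange_one, decide_eq_true_eq] at h1 h2
      obtain ⟨⟨hr1, _⟩, _, hm1⟩ := h1
      obtain ⟨⟨hr2, _⟩, _, hm2⟩ := h2
      obtain ⟨k1, hk1⟩ := (PySem.Int.mod_eq_zero_iff_dvd n r1).mp hm1
      obtain ⟨k2, hk2⟩ := (PySem.Int.mod_eq_zero_iff_dvd n r2).mp hm2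
      have e1 : PySem.Int.floordiv n r1 = k1 := by
        rw [PySem.Int.floordiv_eq_ediv_of_pos (by omega : (0:Int) < r1), hk1,
          Int.mul_ediv_cancel_left _ (by omega : r1 ≠ 0)]
      have e2 : PySem.Int.floordiv n r2 = k2 := by
        rw [PySem.Int.floordiv_eq_ediv_of_pos (by omega : (0:Int) < r2), hk2,
          Int.mul_ediv_cancel_left _ (by omega : r2 ≠ 0)]
      rw [e1, e2] at hf
      have hke : k1 = k2 := by omega
      have hk0 : k1 ≠ 0 := by
        intro h0; rw [h0, mul_zero] at hk1; omega
      have hmm : r1 * k1 = r2 * k1 := by rw [← hk1, hk2, hke]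
      exact mul_right_cancel₀ hk0 hmm
    · exact List.Nodup.filter _ (PySem.List.nodup_pyRange_one 1 n)

theorem pv_alt_zero : solve_alt 0 = 0 := by
  unfold solve_alt; rw [solveAltLoop]; norm_num

theorem pv_alt_one : solve_alt 1 = 0 := by
  unfold solve_alt; rw [solveAltLoop]; norm_num

-- ===== VERDICT (by name: the statement is the Claim_ definition above) =====
theorem solve_spec : Claim_unchanged_solve := by
  intro n _ hpre hD
  unfold Pre_solve at hpre
  unfold D_solve at hD
  rcases eq_or_lt_of_le (show 1 ≤ n by omega) with h1 | h2
  · rw [← h1, pv_alt_one]; decide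
  · exact pv_main n (by omega)

theorem solve_changed : Claim_changed_solve := by
  unfold Claim_changed_solve
  refine ⟨by decide, by decide, by decide, by decide, pv_alt_zero, by decide⟩

theorem solve_tight : Claim_exact_solve := by
  intro n _ _ hD
  unfold D_solve at hD
  subst hD
  rw [pv_alt_zero]
  decide
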